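-- pv_equiv track=rewrite | github.com/erin-koen/Whiteboard-Pairing | ZerosToTheRight/solution.py | zeros_to_right
-- ===== SOURCE A (Python) =====
-- def zeros_to_right(arr):
--     zeros = []
--     non_zeros = []
--     for item in arr:
--         if item == 0:
--             zeros.append(item)
--         else:
--             non_zeros.append(item)
--     return len(non_zeros)
-- ===== SOURCE B (Python) =====
-- def zeros_to_right(arr):
--     def go(lo, hi):
--         if hi - lo == 0:
--             return 0
--         if hi - lo == 1:
--             return 0 if arr[lo] == 0 else 1
--         mid = (lo + hi) // 2
--         return go(lo, mid) + go(mid, hi)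
--     return go(0, len(arr))
-- ===== Notes on version B (the rewrite author's own statement) =====
-- stated objective: alternative
-- what changed: Replaces A's single-pass loop that partitions the input into two accumulator lists with a divide-and-conquer recursion over index ranges that counts non-zero elements by splitting the range at its midpoint and adding the two halves' counts (no lists maintained).
import Mathlib
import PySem

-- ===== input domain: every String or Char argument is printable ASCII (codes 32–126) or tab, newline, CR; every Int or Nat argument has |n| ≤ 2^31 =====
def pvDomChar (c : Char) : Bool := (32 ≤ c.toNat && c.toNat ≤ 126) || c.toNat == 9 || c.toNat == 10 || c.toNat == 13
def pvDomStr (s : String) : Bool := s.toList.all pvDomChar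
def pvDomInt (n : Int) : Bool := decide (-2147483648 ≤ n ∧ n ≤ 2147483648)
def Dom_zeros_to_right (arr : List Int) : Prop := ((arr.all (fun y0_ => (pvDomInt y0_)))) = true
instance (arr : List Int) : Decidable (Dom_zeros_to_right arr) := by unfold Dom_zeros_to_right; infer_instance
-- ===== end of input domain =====

-- B counts non-zero elements by divide-and-conquer over index ranges instead of A's loop
-- partitioning into two accumulator lists (objective: alternative).

-- ===== PORT A =====
-- A's loop keeps both accumulator lists; ported as a foldl over the pair (zeros, non_zeros).
def zeros_to_right (arr : List Int) : Int :=
  let p := arr.foldl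
    (fun (acc : List Int × List Int) item =>
      if item == 0 then (acc.1 ++ [item], acc.2) else (acc.1, acc.2 ++ [item]))
    ([], [])
  (p.2.length : Int)

-- ===== PORT B =====
-- go(lo, hi) of Source B; arr[lo] is only reached with lo < arr.length, so getD is exact there.
def ztrGo (arr : List Int) (lo hi : Nat) : Int :=
  if hi - lo = 0 then 0
  else if hi - lo = 1 then (if arr.getD lo 0 == 0 then 0 else 1)
  else
    let mid := (lo + hi) / 2
    ztrGo arr lo mid + ztrGo arr mid hi
termination_by hi - lo
decreasing_by all_goals omega

def zeros_to_right_alt (arr : List Int) : Int :=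
  ztrGo arr 0 arr.length

-- ===== PRECONDITION & SPEC =====
def Spec_zeros_to_right (arr : List Int) (out : Int) : Prop := out = zeros_to_right_alt arr
instance (arr : List Int) (out : Int) : Decidable (Spec_zeros_to_right arr out) := by unfold Spec_zeros_to_right; infer_instance

-- ===== CLAIM (what is proved, stated in full; the proofs are below) =====
def Claim_equal_zeros_to_right : Prop := ∀ (arr : List Int), Dom_zeros_to_right arr → Spec_zeros_to_right arr (zeros_to_right arr)

-- ===== LEMMAS AND PROOFS =====

-- A-side loop invariant: the non_zeros accumulator ends with length (input length − count of 0s).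
theorem zeros_to_right_fold_lengths (arr : List Int) (z nz : List Int) :
    (arr.foldl (fun (acc : List Int × List Int) item =>
        if item == 0 then (acc.1 ++ [item], acc.2) else (acc.1, acc.2 ++ [item])) (z, nz)).2.length
      = nz.length + (arr.length - arr.count 0) := by
  induction arr generalizing z nz with
  | nil => simp
  | cons x xs ih =>
      have hc := List.count_le_length (l := xs) (a := (0 : Int))
      by_cases h : x = 0
      · simp only [List.foldl_cons, h, BEq.rfl, if_true]
        rw [ih]
        simp
      · rw [List.foldl_cons, if_neg (by simp [h])]
        rw [ih]
        simp [h]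
        omega

-- Every list splits into its non-zero and zero elements by count.
theorem countP_ne_add_count_zero (arr : List Int) :
    arr.countP (fun x => !(x == 0)) + arr.count 0 = arr.length := by
  induction arr with
  | nil => simp
  | cons x xs ih =>
      rw [List.countP_cons, List.count_cons, List.length_cons]
      by_cases hx : x = 0 <;> simp [hx] <;> omega

-- B-side invariant: ztrGo counts the non-zero entries of the segment arr[lo:hi].
theorem ztrGo_eq_countP (arr : List Int) (lo hi : Nat) (hlo : lo ≤ hi) (hhi : hi ≤ arr.length) :
    ztrGo arr lo hi = (((arr.drop lo).take (hi - lo)).countP (fun x => !(x == 0)) : Int) := by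
  generalize hfuel : hi - lo = n
  induction n using Nat.strong_induction_on generalizing lo hi with
  | _ n ih =>
    subst hfuel
    rw [ztrGo]
    by_cases h0 : hi - lo = 0
    · simp [h0]
    · rw [if_neg h0]
      by_cases h1 : hi - lo = 1
      · have hlt : lo < arr.length := by omega
        rw [if_pos h1]
        have hseg : (arr.drop lo).take (hi - lo) = [arr[lo]] := by
          rw [h1, List.take_one]
          simp [List.head?_drop, List.getElem?_eq_getElem hlt]
        rw [hseg]
        simp [List.countP_cons]
        by_cases hz : arr[lo] = 0 <;>
          simp [List.getElem?_eq_getElem hlt, hz]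
      · rw [if_neg h1]
        have h2 : 2 ≤ hi - lo := by omega
        show ztrGo arr lo ((lo + hi) / 2) + ztrGo arr ((lo + hi) / 2) hi
            = (((arr.drop lo).take (hi - lo)).countP (fun x => !(x == 0)) : Int)
        set mid := (lo + hi) / 2 with hmid
        have hm1 : lo < mid := by omega
        have hm2 : mid < hi := by omega
        rw [ih (mid - lo) (by omega) lo mid (by omega) (by omega) rfl,
            ih (hi - mid) (by omega) mid hi (by omega) (by omega) rfl]
        have hsplit : (arr.drop lo).take (hi - lo)
            = (arr.drop lo).take (mid - lo) ++ (arr.drop mid).take (hi - mid) := by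
          have hsum : hi - lo = (mid - lo) + (hi - mid) := by omega
          rw [hsum, List.take_add, List.drop_drop, Nat.add_sub_cancel' hm1.le]
        rw [hsplit, List.countP_append]
        push_cast
        ring

-- ===== VERDICT (by name: the statement is the Claim_ definition above) =====
theorem zeros_to_right_spec : Claim_equal_zeros_to_right := by
  intro arr _
  unfold Spec_zeros_to_right zeros_to_right zeros_to_right_alt
  rw [ztrGo_eq_countP arr 0 arr.length (Nat.zero_le _) le_rfl]
  have h := zeros_to_right_fold_lengths arr [] []
  simp only [List.drop_zero, Nat.sub_zero, List.take_length]
  simp only [List.length_nil, Nat.zero_add] at h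
  rw [h]
  have hsplit := countP_ne_add_count_zero arr
  omega
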